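-- pv_equiv track=rewrite | github.com/TGChenZP/JXAutoML | JXAutoML/GuangAn.py | _get_categorical
-- ===== SOURCE A (Python) =====
-- import copy
--
-- def _get_categorical(new_cat, boundaries):
--     """ Helper to get all combos of categorical feature's values (for use in OLS) """
--
--     # Classic JiaXing algorithm for getting all combinations
--     out = [[]]
--     for hyperparameter in new_cat:
--         if new_cat[hyperparameter] is True:
--             old_out = copy.deepcopy(out)
--             out = list()
--
--             val_list = list(boundaries[hyperparameter])
--             val_list_unique = list(set(val_list))
--             val_list_unique.sort()
--
--             for val in val_list_unique:
--                 for lst in old_out: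
--                     tmp = copy.deepcopy(lst)
--                     tmp.append(val)
--                     out.append(tmp)
--
--     return out
-- ===== SOURCE B (Python) =====
-- def _get_categorical(new_cat, boundaries):
--     """ Helper to get all combos of categorical feature's values (for use in OLS) """
--     value_lists = [sorted(set(boundaries[h])) for h in new_cat if new_cat[h] is True]
--
--     def combos(lists):
--         if not lists:
--             return [[]]
--         rest = combos(lists[1:])
--         return [[v] + c for c in rest for v in lists[0]]
--
--     return combos(value_lists)
-- ===== Notes on version B (the rewrite author's own statement) =====
-- stated objective: faster
-- what changed: A's iterative accumulator with per-step deepcopies of the whole partial product is replaced by a recursive Cartesian-product builder over the list of sorted unique value lists, prepending each value to the recursively built tails (first key varying fastest, as in A).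
import Mathlib
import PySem

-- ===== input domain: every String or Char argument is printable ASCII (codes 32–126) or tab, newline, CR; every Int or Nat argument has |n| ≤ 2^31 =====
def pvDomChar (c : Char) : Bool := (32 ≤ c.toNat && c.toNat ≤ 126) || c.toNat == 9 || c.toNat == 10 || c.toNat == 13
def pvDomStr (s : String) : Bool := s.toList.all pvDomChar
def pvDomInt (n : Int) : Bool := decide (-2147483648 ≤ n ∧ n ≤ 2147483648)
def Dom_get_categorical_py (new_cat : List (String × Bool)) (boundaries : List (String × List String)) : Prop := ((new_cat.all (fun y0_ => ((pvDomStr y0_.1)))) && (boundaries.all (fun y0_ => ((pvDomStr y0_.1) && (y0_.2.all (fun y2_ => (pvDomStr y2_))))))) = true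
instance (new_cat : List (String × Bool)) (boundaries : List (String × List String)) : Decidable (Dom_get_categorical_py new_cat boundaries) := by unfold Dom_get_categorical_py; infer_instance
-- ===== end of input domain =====

-- B replaces A's accumulator loop (which deepcopies the whole partial product at each
-- active key) by a recursive Cartesian-product builder over the sorted unique value
-- lists, avoiding A's deepcopies (a constant-factor saving). Return values only.

-- ===== PORT A =====
-- val_list_unique = sorted(list(set(val_list))): set then in-place sort, identity key
def pvSortedUnique (xs : List String) : List String :=
  PySem.List.sorted (PySem.Set.ofList xs) (fun x => x) false

def get_categorical_py (new_cat : List (String × Bool)) (boundaries : List (String × List String)) : List (List String) :=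
  let nd := PySem.Dict.ofList new_cat
  let bd := PySem.Dict.ofList boundaries
  -- for hyperparameter in new_cat: … (dict iteration; boundaries[h] is bd.getD h [],
  -- total form: Pre_ excludes the KeyError inputs)
  nd.items.foldl
    (fun out p =>
      if p.2 = true then
        (pvSortedUnique (bd.getD p.1 [])).flatMap
          (fun val => out.map (fun lst => lst ++ [val]))
      else out)
    [[]]

-- ===== PORT B =====
-- combos(lists): [[]] if empty, else [[v] + c for c in combos(lists[1:]) for v in lists[0]]
def pvCombos (lists : List (List String)) : List (List String) :=
  match lists with
  | [] => [[]]
  | h :: t => (pvCombos t).flatMap (fun c => h.map (fun v => v :: c))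

def get_categorical_py_alt (new_cat : List (String × Bool)) (boundaries : List (String × List String)) : List (List String) :=
  let bd := PySem.Dict.ofList boundaries
  pvCombos
    ((PySem.Dict.ofList new_cat).items.filterMap
      (fun p => if p.2 = true then some (pvSortedUnique (bd.getD p.1 [])) else none))

-- ===== PRECONDITION & SPEC =====
-- Pre_ excludes exactly the inputs where Python A raises KeyError: an active key of
-- new_cat that is missing from boundaries (B raises there too).
def Pre_get_categorical_py (new_cat : List (String × Bool)) (boundaries : List (String × List String)) : Prop :=
  ∀ p ∈ new_cat, p.2 = true → p.1 ∈ boundaries.map Prod.fst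
instance (new_cat : List (String × Bool)) (boundaries : List (String × List String)) : Decidable (Pre_get_categorical_py new_cat boundaries) := by unfold Pre_get_categorical_py; infer_instance

def pvWitness_get_categorical_py : (List (String × Bool)) × (List (String × List String)) :=
  ([("a", true), ("b", false)], [("a", ["y", "x", "y"])])

def Spec_get_categorical_py (new_cat : List (String × Bool)) (boundaries : List (String × List String)) (out : List (List String)) : Prop := out = get_categorical_py_alt new_cat boundaries
instance (new_cat : List (String × Bool)) (boundaries : List (String × List String)) (out : List (List String)) : Decidable (Spec_get_categorical_py new_cat boundaries out) := by unfold Spec_get_categorical_py; infer_instance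

-- ===== CLAIM (what is proved, stated in full; the proofs are below) =====
def Claim_equal_get_categorical_py : Prop := ∀ (new_cat : List (String × Bool)) (boundaries : List (String × List String)), Dom_get_categorical_py new_cat boundaries → Pre_get_categorical_py new_cat boundaries → Spec_get_categorical_py new_cat boundaries (get_categorical_py new_cat boundaries)

-- ===== LEMMAS AND PROOFS =====

-- the guarded foldl over items is the foldl of A's extension step over the filterMap'd value lists
theorem pv_foldl_filterMap (xs : List (String × Bool)) (g : String → List String)
    (init : List (List String)) :
    xs.foldl (fun out p => if p.2 = true then
        (g p.1).flatMap (fun v => out.map (fun lst => lst ++ [v])) else out) init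
      = (xs.filterMap (fun p => if p.2 = true then some (g p.1) else none)).foldl
          (fun out L => L.flatMap (fun v => out.map (fun lst => lst ++ [v]))) init := by
  induction xs generalizing init with
  | nil => rfl
  | cons x t ih =>
    by_cases h : x.2 = true <;> simp [h, List.foldl_cons, ih]

-- A's product-extension loop, run over any list of value lists, is pvCombos-shaped
theorem pv_foldl_eq_combos (Ls : List (List String)) (acc : List (List String)) :
    Ls.foldl (fun out L => L.flatMap (fun v => out.map (fun lst => lst ++ [v]))) acc
      = (pvCombos Ls).flatMap (fun c => acc.map (fun lst => lst ++ c)) := by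
  induction Ls generalizing acc with
  | nil => simp [pvCombos]
  | cons L t ih =>
    simp only [List.foldl_cons, ih, pvCombos, List.flatMap_assoc, List.flatMap_map]
    apply List.flatMap_congr
    intro c _
    simp only [List.map_flatMap, List.map_map, Function.comp_def, List.append_assoc,
      List.singleton_append]

-- ===== VERDICT (by name: the statement is the Claim_ definition above) =====
theorem get_categorical_py_spec : Claim_equal_get_categorical_py := by
  intro new_cat boundaries _ _
  unfold Spec_get_categorical_py
  simp only [get_categorical_py, get_categorical_py_alt]
  rw [pv_foldl_filterMap (PySem.Dict.ofList new_cat).items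
        (fun h => pvSortedUnique ((PySem.Dict.ofList boundaries).getD h [])),
      pv_foldl_eq_combos]
  simp
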